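-- pv_equiv track=rewrite | github.com/Pingdred/aoc_2024 | day_12/part_2.py | count_cell_vertices
-- ===== SOURCE A (Python) =====
-- from typing import Tuple, List
--
-- def get_neighbors(pos: Tuple[int]) -> List[Tuple[int]]:
--     directions = [(0, 1), (1, 0), (0, -1), (-1, 0)]
--
--     neighbors = []
--     for direction in directions:
--         i = pos[0] + direction[0]
--         j = pos[1] + direction[1]
--         neighbors.append((i, j))
--
--     return neighbors
--
-- def get_missing_corner(cell: Tuple[int, int], neighbors: List[Tuple[int, int]]) -> Tuple[int]:
--     cell_row, cell_col = cell
--     neighbor1_row, neighbor1_col = neighbors[0]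
--     neighbor2_row, neighbor2_col = neighbors[1]
--
--     # Get the direction of the neighbors
--     neighbor1_direction = (neighbor1_row - cell_row, neighbor1_col - cell_col)
--     neighbor2_direction = (neighbor2_row - cell_row, neighbor2_col - cell_col)
--
--     # Get the direction of the missing corner
--     missing_corner_direction = (
--         neighbor1_direction[0] + neighbor2_direction[0],
--           neighbor1_direction[1] + neighbor2_direction[1]
--     )
--
--     # Move the cell to the missing corner
--     missing_corner = (
--         cell_row + missing_corner_direction[0],
--         cell_col + missing_corner_direction[1]
--     )
--
--     return missing_corner
--
-- def count_cell_vertices(cell, region) -> int: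
--
--     neighbors = get_neighbors(cell)
--     neighbors = [n for n in neighbors if n in region]
--     num_neighbors = len(neighbors)
--
--     # If the cell has 0 in-region neighbors, the number of vertices is 4
--     # because the cell is isolated
--     if num_neighbors == 0:
--         return 4
--
--     # If the cell has 1 in-region neighbor, the number of vertices is 2
--     # because the cell is on the edge of the region
--     if num_neighbors == 1:
--         return  2
--
--     if num_neighbors == 2:
--         # Check if neighbors are in the same row or column
--         same_row = neighbors[0][0] == neighbors[1][0]
--         same_col = neighbors[0][1] == neighbors[1][1]
--         if same_col or same_row:
--             return 0
--
--         missing_corner = get_missing_corner(cell, neighbors)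
--         if missing_corner not in region:
--             return 2
--
--         return 1
--
--     if num_neighbors == 3:
--         corners = []
--         for i in range(3):
--             for j in range(i+1, 3):
--                 # Check if neighbors are in the same row or column
--                 same_row = neighbors[i][0] == neighbors[j][0]
--                 same_col = neighbors[i][1] == neighbors[j][1]
--                 if same_col or same_row:
--                     continue
--
--                 missing_corner = get_missing_corner(cell, [neighbors[i], neighbors[j]])
--                 if missing_corner in region:
--                     corners.append(missing_corner)
--
--         return 2 - len(corners)
--
--
--     # If the cell has 4 neighbors, the number of vertices is
--     # the number of diagonal spots that are not in the region
--     diagonal_directions = [(1, 1), (1, -1), (-1, 1), (-1, -1)]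
--     diagonal_neighbors = []
--     for d in diagonal_directions:
--         i = cell[0] + d[0]
--         j = cell[1] + d[1]
--         if (i, j) in region:
--             diagonal_neighbors.append((i, j))
--
--     return 4 - len(diagonal_neighbors)
-- ===== SOURCE B (Python) =====
-- def count_cell_vertices(cell, region) -> int:
--     x, y = cell
--     quadrants = [((0, 1), (1, 0)), ((1, 0), (0, -1)), ((0, -1), (-1, 0)), ((-1, 0), (0, 1))]
--     count = 0
--     for d1, d2 in quadrants:
--         a = (x + d1[0], y + d1[1]) in region
--         b = (x + d2[0], y + d2[1]) in region
--         diag = (x + d1[0] + d2[0], y + d1[1] + d2[1]) in region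
--         if not a and not b:
--             count += 1
--         elif a and b and not diag:
--             count += 1
--     return count
-- ===== Notes on version B (the rewrite author's own statement) =====
-- stated objective: simpler
-- what changed: B replaces A's dispatch on the number of in-region orthogonal neighbors (with the get_missing_corner helper and nested pair loops) by one uniform loop over the four corner quadrants, counting a convex corner when both orthogonal neighbors are absent and a concave corner when both are present but the diagonal is absent.
import Mathlib
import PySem

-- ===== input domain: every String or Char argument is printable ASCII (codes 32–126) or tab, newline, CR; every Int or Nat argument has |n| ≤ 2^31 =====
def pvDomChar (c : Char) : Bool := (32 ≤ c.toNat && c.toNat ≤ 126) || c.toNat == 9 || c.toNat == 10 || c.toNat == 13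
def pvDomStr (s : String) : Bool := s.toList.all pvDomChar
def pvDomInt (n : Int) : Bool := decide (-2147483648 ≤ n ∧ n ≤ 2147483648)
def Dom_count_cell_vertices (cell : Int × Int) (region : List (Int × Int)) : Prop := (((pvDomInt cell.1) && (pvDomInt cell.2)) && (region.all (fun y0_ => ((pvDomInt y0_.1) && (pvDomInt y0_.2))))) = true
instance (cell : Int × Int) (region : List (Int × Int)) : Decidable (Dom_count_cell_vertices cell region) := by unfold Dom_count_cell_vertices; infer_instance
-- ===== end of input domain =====

-- B replaces A's neighbor-count dispatch (with get_missing_corner and nested pair loops)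
-- by one uniform loop over the four corner quadrants (convex/concave corner test); objective: simpler.


-- ===== PORT A =====
def pv_get_neighbors (pos : Int × Int) : List (Int × Int) :=
  let directions : List (Int × Int) := [(0, 1), (1, 0), (0, -1), (-1, 0)]
  directions.foldl (fun acc d => acc ++ [(pos.1 + d.1, pos.2 + d.2)]) []

-- A only ever calls this with a 2-element list, so getD with a dummy default is exact there
def pv_get_missing_corner (cell : Int × Int) (neighbors : List (Int × Int)) : Int × Int :=
  let n1 := neighbors.getD 0 (0, 0)
  let n2 := neighbors.getD 1 (0, 0)
  let d1 : Int × Int := (n1.1 - cell.1, n1.2 - cell.2)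
  let d2 : Int × Int := (n2.1 - cell.1, n2.2 - cell.2)
  (cell.1 + (d1.1 + d2.1), cell.2 + (d1.2 + d2.2))

def count_cell_vertices (cell : Int × Int) (region : List (Int × Int)) : Int :=
  let neighbors := (pv_get_neighbors cell).filter (fun n => decide (n ∈ region))
  let num : Int := neighbors.length
  if num = 0 then 4
  else if num = 1 then 2
  else if num = 2 then
    let n0 := neighbors.getD 0 (0, 0)
    let n1 := neighbors.getD 1 (0, 0)
    if n0.1 = n1.1 ∨ n0.2 = n1.2 then 0
    else if pv_get_missing_corner cell [n0, n1] ∉ region then 2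
    else 1
  else if num = 3 then
    let corners := (PySem.List.pyRange 0 3 1).foldl (fun acc i =>
      (PySem.List.pyRange (i + 1) 3 1).foldl (fun acc2 j =>
        let ni := PySem.List.pyGetD neighbors i (0, 0)
        let nj := PySem.List.pyGetD neighbors j (0, 0)
        if ni.1 = nj.1 ∨ ni.2 = nj.2 then acc2
        else
          let mc := pv_get_missing_corner cell [ni, nj]
          if mc ∈ region then acc2 ++ [mc] else acc2) acc) []
    2 - (corners.length : Int)
  else
    let diagonal_directions : List (Int × Int) := [(1, 1), (1, -1), (-1, 1), (-1, -1)]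
    let diagonal_neighbors := diagonal_directions.foldl (fun acc d =>
      if (cell.1 + d.1, cell.2 + d.2) ∈ region then acc ++ [(cell.1 + d.1, cell.2 + d.2)] else acc) []
    4 - (diagonal_neighbors.length : Int)

-- ===== PORT B =====
def count_cell_vertices_alt (cell : Int × Int) (region : List (Int × Int)) : Int :=
  let quadrants : List ((Int × Int) × (Int × Int)) :=
    [((0, 1), (1, 0)), ((1, 0), (0, -1)), ((0, -1), (-1, 0)), ((-1, 0), (0, 1))]
  quadrants.foldl (fun count q =>
    let a := decide ((cell.1 + q.1.1, cell.2 + q.1.2) ∈ region)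
    let b := decide ((cell.1 + q.2.1, cell.2 + q.2.2) ∈ region)
    let diag := decide ((cell.1 + q.1.1 + q.2.1, cell.2 + q.1.2 + q.2.2) ∈ region)
    if !a && !b then count + 1
    else if a && b && !diag then count + 1
    else count) 0

-- ===== PRECONDITION & SPEC =====
def Spec_count_cell_vertices (cell : Int × Int) (region : List (Int × Int)) (out : Int) : Prop := out = count_cell_vertices_alt cell region
instance (cell : Int × Int) (region : List (Int × Int)) (out : Int) : Decidable (Spec_count_cell_vertices cell region out) := by unfold Spec_count_cell_vertices; infer_instance

-- ===== CLAIM (what is proved, stated in full; the proofs are below) =====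
def Claim_equal_count_cell_vertices : Prop := ∀ (cell : Int × Int) (region : List (Int × Int)), Dom_count_cell_vertices cell region → Spec_count_cell_vertices cell region (count_cell_vertices cell region)

-- ===== LEMMAS AND PROOFS =====

-- ===== VERDICT (by name: the statement is the Claim_ definition above) =====
set_option maxHeartbeats 1000000 in
theorem count_cell_vertices_spec : Claim_equal_count_cell_vertices := by
  intro cell region _
  obtain ⟨x, y⟩ := cell
  unfold Spec_count_cell_vertices
  have p0 : PySem.List.pyRange 0 3 1 = [0, 1, 2] := by decide
  have pa : PySem.List.pyRange 1 3 1 = [1, 2] := by decide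
  have pb : PySem.List.pyRange 2 3 1 = [2] := by decide
  have pc : PySem.List.pyRange 3 3 1 = [] := by decide
  by_cases h1 : (x, y + 1) ∈ region <;>
  by_cases h2 : (x + 1, y) ∈ region <;>
  by_cases h3 : (x, y + -1) ∈ region <;>
  by_cases h4 : (x + -1, y) ∈ region <;>
  simp [count_cell_vertices, count_cell_vertices_alt, pv_get_neighbors, pv_get_missing_corner,
    p0, pa, pb, pc, PySem.List.pyGetD_ofNat', h1, h2, h3, h4] <;>
  split_ifs <;> (try simp_all)
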